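-- pv_equiv track=rewrite | github.com/YangsCloud/Younger | youngbench/dataset/construct/utils/extract.py | clean_head
-- ===== SOURCE A (Python) =====
-- def clean_head(lines: list[str]) -> list[str]:
--     split_pattern = '---'
--     if len(lines) <= 2:
--         return lines
--     if lines[0].strip() == split_pattern:
--         for index, line in enumerate(lines[1:], start=1):
--             if line.strip() == split_pattern:
--                 break
--         return lines[index+1:]
--     return lines
-- ===== SOURCE B (Python) =====
-- def clean_head(lines: list[str]) -> list[str]:
--     if len(lines) <= 2:
--         return lines
--     idxs = [i for i, l in enumerate(lines) if l.strip() == '---']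
--     if idxs and idxs[0] == 0:
--         return lines[idxs[1] + 1:] if len(idxs) >= 2 else []
--     return lines
-- ===== Notes on version B (the rewrite author's own statement) =====
-- stated objective: alternative
-- what changed: Replaces the scan-until-break loop (whose leftover loop index drives the final slice) with a one-pass delimiter-index table followed by a direct slice decision, reproducing the empty-result behaviour when the closing '---' is missing.
import Mathlib
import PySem

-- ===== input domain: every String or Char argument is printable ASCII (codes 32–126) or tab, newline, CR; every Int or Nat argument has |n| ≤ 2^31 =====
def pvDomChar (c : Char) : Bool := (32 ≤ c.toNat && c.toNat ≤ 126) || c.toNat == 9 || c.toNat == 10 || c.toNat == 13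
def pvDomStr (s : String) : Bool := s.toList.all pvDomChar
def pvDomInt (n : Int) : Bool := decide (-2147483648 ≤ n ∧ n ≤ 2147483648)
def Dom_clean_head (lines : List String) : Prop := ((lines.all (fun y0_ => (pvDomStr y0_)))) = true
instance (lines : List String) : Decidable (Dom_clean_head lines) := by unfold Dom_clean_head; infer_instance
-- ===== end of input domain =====

-- B replaces A's scan-until-break (leftover loop index) with a delimiter-index table and a direct slice decision; alternative decomposition, same cost.


-- ===== PORT A =====
-- the for-loop over enumerate(lines[1:], start=1): returns the final value of `index`
-- (the index of the first '---' if the loop breaks, else the last index len(lines)-1)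
def cleanHeadLoop : Int → List String → Int
  | i, [] => i - 1
  | i, l :: rest => if PySem.Str.strip l = "---" then i else cleanHeadLoop (i + 1) rest

def clean_head (lines : List String) : List String :=
  if lines.length ≤ 2 then lines
  else if PySem.Str.strip (PySem.List.pyGetD lines 0 "") = "---" then
    PySem.List.slice lines (some (cleanHeadLoop 1 lines.tail + 1)) none
  else lines

-- ===== PORT B =====
-- the comprehension [i for i, l in enumerate(lines) if l.strip() == '---'] with a start offset
def delimIdxs (s : Int) (t : List String) : List Int :=
  (PySem.List.enumerate t s).filterMap
    (fun p => if PySem.Str.strip p.2 = "---" then some p.1 else none)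

def clean_head_alt (lines : List String) : List String :=
  if lines.length ≤ 2 then lines
  else
    match delimIdxs 0 lines with
    | [] => lines
    | i0 :: rest =>
      if i0 = 0 then
        match rest with
        | i1 :: _ => PySem.List.slice lines (some (i1 + 1)) none
        | [] => []
      else lines

-- ===== PRECONDITION & SPEC =====
def Spec_clean_head (lines : List String) (out : List String) : Prop := out = clean_head_alt lines
instance (lines : List String) (out : List String) : Decidable (Spec_clean_head lines out) := by unfold Spec_clean_head; infer_instance

-- ===== CLAIM (what is proved, stated in full; the proofs are below) =====
def Claim_equal_clean_head : Prop := ∀ (lines : List String), Dom_clean_head lines → Spec_clean_head lines (clean_head lines)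

-- ===== LEMMAS AND PROOFS =====
lemma delimIdxs_nil (s : Int) : delimIdxs s [] = [] := by
  simp [delimIdxs, PySem.List.enumerate_nil]

lemma delimIdxs_cons (s : Int) (x : String) (t : List String) :
    delimIdxs s (x :: t) =
      if PySem.Str.strip x = "---" then s :: delimIdxs (s + 1) t else delimIdxs (s + 1) t := by
  simp [delimIdxs, PySem.List.enumerate_cons, List.filterMap_cons]
  split_ifs <;> simp

lemma mem_delimIdxs_ge (t : List String) : ∀ (s j : Int), j ∈ delimIdxs s t → s ≤ j := by
  induction t with
  | nil => intro s j h; simp [delimIdxs_nil] at h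
  | cons x t ih =>
    intro s j h
    rw [delimIdxs_cons] at h
    split_ifs at h with hx
    · rcases List.mem_cons.mp h with h | h
      · omega
      · have := ih (s + 1) j h; omega
    · have := ih (s + 1) j h; omega

lemma loop_of_delim_nil (t : List String) : ∀ (s : Int),
    delimIdxs s t = [] → cleanHeadLoop s t = s + t.length - 1 := by
  induction t with
  | nil => intro s _; simp [cleanHeadLoop]
  | cons x t ih =>
    intro s h
    rw [delimIdxs_cons] at h
    split_ifs at h with hx
    unfold cleanHeadLoop
    rw [if_neg hx, ih (s + 1) h]
    simp only [List.length_cons]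
    push_cast; ring

lemma loop_of_delim_cons (t : List String) : ∀ (s j : Int) (r : List Int),
    delimIdxs s t = j :: r → cleanHeadLoop s t = j := by
  induction t with
  | nil => intro s j r h; simp [delimIdxs_nil] at h
  | cons x t ih =>
    intro s j r h
    rw [delimIdxs_cons] at h
    split_ifs at h with hx
    · injection h with h1 _
      unfold cleanHeadLoop
      rw [if_pos hx]; exact h1
    · unfold cleanHeadLoop
      rw [if_neg hx]; exact ih (s + 1) j r h

-- ===== VERDICT (by name: the statement is the Claim_ definition above) =====
theorem clean_head_spec : Claim_equal_clean_head := by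
  intro lines _
  unfold Spec_clean_head clean_head clean_head_alt
  by_cases hlen : lines.length ≤ 2
  · simp [hlen]
  · simp only [hlen, if_false]
    match lines, hlen with
    | l0 :: t, hlen =>
      simp only [List.tail_cons]
      rw [delimIdxs_cons]
      simp only [zero_add]
      have hg : PySem.List.pyGetD (l0 :: t) 0 "" = l0 := by
        simp [PySem.List.pyGetD, PySem.List.pyGet?, PySem.List.pyIdx?]
      rw [hg]
      by_cases h0 : PySem.Str.strip l0 = "---"
      · rw [if_pos h0, if_pos h0]
        cases hd : delimIdxs 1 t with
        | nil =>
          rw [loop_of_delim_nil t 1 hd]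
          have h1 : (1 : Int) + ↑t.length - 1 + 1 = ((t.length + 1 : Nat) : Int) := by push_cast; ring
          rw [h1, PySem.List.slice_from_natCast]
          simp
        | cons j r =>
          rw [loop_of_delim_cons t 1 j r hd]
          simp
      · rw [if_neg h0, if_neg h0]
        cases hd : delimIdxs 1 t with
        | nil => rfl
        | cons j r =>
          have hj : (1 : Int) ≤ j := mem_delimIdxs_ge t 1 j (by rw [hd]; exact List.mem_cons_self)
          have hj0 : ¬ (j = 0) := by omega
          simp [hj0]
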